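-- pv_equiv track=rewrite | github.com/Soumen3/Python-Programs | CodeVita/String_Obsession.py | maxSubstringRemoval
-- ===== SOURCE A (Python) =====
-- def maxSubstringRemoval(substrings, main_string):
--     # Memoization to store previously computed states
--     memo = {}
--
--     def removeSubstring(s, sub):
--         """Remove first occurrence of substring."""
--         idx = s.find(sub)
--         return s[:idx] + s[idx+len(sub):] if idx != -1 else s
--
--     def solved(current_string, remaining_subs):
--         key = (current_string, tuple(sorted(remaining_subs)))
--
--         if key in memo:
--             return memo[key]
--
--         max_removals = 0
--
--         for i, sub in enumerate(remaining_subs):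
--             if sub in current_string:
--                 new_subs = remaining_subs[:i] + remaining_subs[i+1:]
--
--                 new_string = removeSubstring(current_string, sub)
--
--                 current_removals = 1 + solved(new_string, new_subs)
--
--                 max_removals = max(max_removals, current_removals)
--
--         memo[key] = max_removals
--         return max_removals
--
--     return solved(main_string, substrings)
-- ===== SOURCE B (Python) =====
-- def maxSubstringRemoval(substrings, main_string):
--     def removeFirst(s, sub):
--         idx = s.find(sub)
--         return s[:idx] + s[idx+len(sub):] if idx != -1 else s
--
--     # Breadth-first search over reachable (string, remaining-substrings) states,
--     # one level per removal; the answer is the number of non-empty levels.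
--     frontier = {(main_string, tuple(substrings))}
--     depth = 0
--     while True:
--         nxt = set()
--         for s, rem in frontier:
--             for i, sub in enumerate(rem):
--                 if sub in s:
--                     nxt.add((removeFirst(s, sub), rem[:i] + rem[i+1:]))
--         if not nxt:
--             return depth
--         depth += 1
--         frontier = nxt
-- ===== Notes on version B (the rewrite author's own statement) =====
-- stated objective: alternative
-- what changed: A's memoized depth-first max-recursion over (string, remaining substrings) states is replaced by an iterative breadth-first search: a worklist set of reachable states is expanded one removal per level, and the answer is the number of levels until no substring can be removed anywhere.
import Mathlib
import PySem

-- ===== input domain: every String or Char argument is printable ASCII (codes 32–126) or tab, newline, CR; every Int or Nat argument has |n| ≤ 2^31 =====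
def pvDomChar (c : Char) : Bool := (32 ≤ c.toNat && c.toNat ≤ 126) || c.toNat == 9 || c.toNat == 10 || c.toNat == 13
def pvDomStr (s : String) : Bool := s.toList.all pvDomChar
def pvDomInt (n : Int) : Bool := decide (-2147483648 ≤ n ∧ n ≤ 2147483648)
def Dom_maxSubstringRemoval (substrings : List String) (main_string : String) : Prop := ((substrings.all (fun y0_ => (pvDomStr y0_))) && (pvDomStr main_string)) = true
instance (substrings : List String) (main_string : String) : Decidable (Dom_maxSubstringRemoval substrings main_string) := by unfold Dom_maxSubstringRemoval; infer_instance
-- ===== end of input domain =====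

-- B replaces A's memoized depth-first max-recursion by a breadth-first level count over the set of
-- reachable (string, remaining-substrings) states: a different decomposition of the same exact search.

-- ===== PORT A =====
-- helper removeSubstring (shared verbatim by both Pythons): remove the first occurrence of sub from s
def pvRemoveFirst (s sub : List Char) : List Char :=
  let idx := PySem.Chars.find s sub
  if idx ≠ -1 then
    PySem.List.slice s none (some idx) ++ PySem.List.slice s (some (idx + (sub.length : Int))) none
  else s

-- A's inner 'solved' recursion; the fuel argument (always = subs.length) only makes the
-- recursion structural, it never changes a branch. A's memo dict is a pure cache and is
-- not carried (it never affects the returned value).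
def pvSolved (fuel : Nat) (s : List Char) (subs : List String) : Int :=
  match fuel with
  | 0 => 0
  | f + 1 =>
    (PySem.List.enumerate subs).foldl
      (fun acc p =>
        if PySem.Chars.isIn p.2.toList s then
          max acc (1 + pvSolved f (pvRemoveFirst s p.2.toList)
            (PySem.List.slice subs none (some p.1) ++ PySem.List.slice subs (some (p.1 + 1)) none))
        else acc) 0

def maxSubstringRemoval (substrings : List String) (main_string : String) : Int :=
  pvSolved substrings.length main_string.toList substrings

-- ===== PORT B =====
-- successor state: first occurrence of p.2 removed from the string, p.2's slot removed from the list
def pvChild (st : List Char × List String) (p : Int × String) : List Char × List String :=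
  (pvRemoveFirst st.1 p.2.toList,
   PySem.List.slice st.2 none (some p.1) ++ PySem.List.slice st.2 (some (p.1 + 1)) none)

-- one BFS level: the set of successors of every state of the frontier
def pvStep (frontier : List (List Char × List String)) : PySem.Set (List Char × List String) :=
  frontier.foldl
    (fun nxt st =>
      (PySem.List.enumerate st.2).foldl
        (fun nxt2 p =>
          if PySem.Chars.isIn p.2.toList st.1 then PySem.Set.add nxt2 (pvChild st p) else nxt2)
        nxt)
    PySem.Set.empty

-- the 'while True' loop; fuel = substrings.length + 1 bounds the level count (each level
-- removes one substring), it never cuts the loop short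
def pvLoop : Nat → List (List Char × List String) → Int → Int
  | 0, _, depth => depth
  | f + 1, frontier, depth =>
    let nxt := pvStep frontier
    if nxt.isEmpty then depth else pvLoop f nxt (depth + 1)

def maxSubstringRemoval_alt (substrings : List String) (main_string : String) : Int :=
  pvLoop (substrings.length + 1) (PySem.Set.ofList [(main_string.toList, substrings)]) 0

-- ===== PRECONDITION & SPEC =====
def Spec_maxSubstringRemoval (substrings : List String) (main_string : String) (out : Int) : Prop := out = maxSubstringRemoval_alt substrings main_string
instance (substrings : List String) (main_string : String) (out : Int) : Decidable (Spec_maxSubstringRemoval substrings main_string out) := by unfold Spec_maxSubstringRemoval; infer_instance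

-- ===== CLAIM (what is proved, stated in full; the proofs are below) =====
def Claim_equal_maxSubstringRemoval : Prop := ∀ (substrings : List String) (main_string : String), Dom_maxSubstringRemoval substrings main_string → Spec_maxSubstringRemoval substrings main_string (maxSubstringRemoval substrings main_string)

-- ===== LEMMAS AND PROOFS =====

-- A's value of a state (fuel = remaining length)
def pvF (st : List Char × List String) : Int := pvSolved st.2.length st.1 st.2

-- the removability test of both programs
def pvCond (st : List Char × List String) (p : Int × String) : Bool :=
  PySem.Chars.isIn p.2.toList st.1

-- max of pvF over a frontier, base 0
def pvFM (F : List (List Char × List String)) : Int :=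
  F.foldl (fun a st => max a (pvF st)) 0

-- generic facts about 'foldl max under an if'
theorem pv_le_foldl_if {β : Type} (c : β → Bool) (h : β → Int) (l : List β) (a : Int) :
    a ≤ l.foldl (fun b x => if c x then max b (h x) else b) a := by
  induction l generalizing a with
  | nil => simp
  | cons x t ih =>
      simp only [List.foldl_cons]
      by_cases hc : c x
      · simp only [hc, if_pos]
        exact le_trans (le_max_left a (h x)) (ih _)
      · simp only [hc, if_neg, Bool.false_eq_true, not_false_iff]
        exact ih a

theorem pv_mem_le_foldl_if {β : Type} (c : β → Bool) (h : β → Int) (l : List β) (a : Int)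
    {x : β} (hx : x ∈ l) (hc : c x = true) :
    h x ≤ l.foldl (fun b y => if c y then max b (h y) else b) a := by
  induction l generalizing a with
  | nil => cases hx
  | cons y t ih =>
      simp only [List.foldl_cons]
      rcases List.mem_cons.mp hx with rfl | hxt
      · simp only [hc, if_pos]
        exact le_trans (le_max_right a (h x)) (pv_le_foldl_if c h t _)
      · exact ih _ hxt

theorem pv_foldl_if_le {β : Type} (c : β → Bool) (h : β → Int) (l : List β) {a d : Int}
    (ha : a ≤ d) (hb : ∀ x ∈ l, c x = true → h x ≤ d) :
    l.foldl (fun b x => if c x then max b (h x) else b) a ≤ d := by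
  induction l generalizing a with
  | nil => simpa using ha
  | cons x t ih =>
      simp only [List.foldl_cons]
      by_cases hc : c x
      · simp only [hc, if_pos]
        exact ih (max_le ha (hb x (List.mem_cons_self) hc)) (fun y hy => hb y (List.mem_cons_of_mem _ hy))
      · simp only [hc, if_neg, Bool.false_eq_true, not_false_iff]
        exact ih ha (fun y hy => hb y (List.mem_cons_of_mem _ hy))

-- pvFM basics
theorem pvFM_nonneg (F : List (List Char × List String)) : 0 ≤ pvFM F :=
  (PySem.List.le_foldl_max_int F pvF 0).1

theorem le_pvFM {F : List (List Char × List String)} {st} (h : st ∈ F) : pvF st ≤ pvFM F :=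
  (PySem.List.le_foldl_max_int F pvF 0).2 st h

theorem pvFM_le {F : List (List Char × List String)} {d : Int}
    (hd : 0 ≤ d) (h : ∀ st ∈ F, pvF st ≤ d) : pvFM F ≤ d := by
  unfold pvFM
  have : ∀ (a : Int), a ≤ d → F.foldl (fun a st => max a (pvF st)) a ≤ d := by
    induction F with
    | nil => intro a ha; simpa using ha
    | cons x t ih =>
        intro a ha
        simp only [List.foldl_cons]
        exact ih (fun y hy => h y (List.mem_cons_of_mem _ hy)) _
          (max_le ha (h x List.mem_cons_self))
  exact this 0 hd

-- length of a child's remaining list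
theorem pv_child_len (subs : List String) (k : Nat) (hk : k < subs.length) :
    (PySem.List.slice subs none (some ((k : Nat) : Int)) ++
      PySem.List.slice subs (some (((k : Nat) : Int) + 1)) none).length = subs.length - 1 := by
  have h1 : PySem.List.slice subs none (some ((k : Nat) : Int)) = subs.take k :=
    PySem.List.slice_to_natCast subs k
  have hcast : ((k : Nat) : Int) + 1 = (((k + 1 : Nat)) : Int) := by push_cast; ring
  have h2 : PySem.List.slice subs (some (((k : Nat) : Int) + 1)) none = subs.drop (k + 1) := by
    rw [hcast]; exact PySem.List.slice_from_natCast subs (k + 1)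
  rw [h1, h2]
  simp [List.length_take, List.length_drop]
  omega

-- unfolding A's recursion one level, expressed with pvF / pvChild / pvCond
theorem pvF_unfold (s : List Char) (subs : List String) :
    pvF (s, subs) = (PySem.List.enumerate subs).foldl
      (fun acc p => if pvCond (s, subs) p then max acc (1 + pvF (pvChild (s, subs) p)) else acc) 0 := by
  cases subs with
  | nil => simp [pvF, pvSolved, PySem.List.enumerate_nil]
  | cons x rest =>
      rw [show pvF (s, x :: rest) = pvSolved (rest.length + 1) s (x :: rest) from rfl]
      rw [show pvSolved (rest.length + 1) s (x :: rest) = (PySem.List.enumerate (x :: rest)).foldl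
        (fun acc p => if PySem.Chars.isIn p.2.toList s then
          max acc (1 + pvSolved rest.length (pvRemoveFirst s p.2.toList)
            (PySem.List.slice (x :: rest) none (some p.1) ++ PySem.List.slice (x :: rest) (some (p.1 + 1)) none))
        else acc) 0 from rfl]
      apply PySem.List.foldl_congr_mem
      intro acc p hp
      rcases (PySem.List.mem_enumerate_iff _ _ _).mp hp with ⟨k, hk, hpk⟩
      subst hpk
      simp only [pvCond, pvChild, pvF, zero_add]
      have hl := pv_child_len (x :: rest) k hk
      rw [hl]
      simp

theorem pv_foldl_if_false {β : Type} (c : β → Bool) (h : β → Int) (l : List β) (a : Int)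
    (hc : ∀ x ∈ l, c x = false) :
    l.foldl (fun b x => if c x then max b (h x) else b) a = a := by
  induction l generalizing a with
  | nil => rfl
  | cons x t ih =>
      simp only [List.foldl_cons, hc x List.mem_cons_self, Bool.false_eq_true, if_false]
      exact ih _ (fun y hy => hc y (List.mem_cons_of_mem _ hy))

theorem pvF_nonneg (st : List Char × List String) : 0 ≤ pvF st := by
  obtain ⟨s, subs⟩ := st
  rw [pvF_unfold]
  exact pv_le_foldl_if _ _ _ 0

-- membership in an if-Set.add fold
theorem pv_mem_foldl_add {β : Type} (c : β → Bool) (g : β → List Char × List String)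
    (l : List β) (acc : PySem.Set (List Char × List String)) (y : List Char × List String) :
    (y ∈ l.foldl (fun s x => if c x then PySem.Set.add s (g x) else s) acc) ↔
      y ∈ acc ∨ ∃ x ∈ l, c x = true ∧ y = g x := by
  induction l generalizing acc with
  | nil => simp
  | cons x t ih =>
      simp only [List.foldl_cons]
      by_cases hc : c x
      · simp only [hc, if_pos]
        rw [ih]
        simp only [PySem.Set.mem_add]
        constructor
        · rintro (⟨hy | rfl⟩ | ⟨z, hz, hcz, rfl⟩)
          · exact Or.inl hy
          · exact Or.inr ⟨x, List.mem_cons_self, hc, rfl⟩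
          · exact Or.inr ⟨z, List.mem_cons_of_mem _ hz, hcz, rfl⟩
        · rintro (hy | ⟨z, hz, hcz, rfl⟩)
          · exact Or.inl (Or.inl hy)
          · rcases List.mem_cons.mp hz with rfl | hzt
            · exact Or.inl (Or.inr rfl)
            · exact Or.inr ⟨z, hzt, hcz, rfl⟩
      · simp only [hc, if_neg, Bool.false_eq_true, not_false_iff]
        rw [ih]
        constructor
        · rintro (hy | ⟨z, hz, hcz, rfl⟩)
          · exact Or.inl hy
          · exact Or.inr ⟨z, List.mem_cons_of_mem _ hz, hcz, rfl⟩
        · rintro (hy | ⟨z, hz, hcz, rfl⟩)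
          · exact Or.inl hy
          · rcases List.mem_cons.mp hz with rfl | hzt
            · exact absurd hcz (by simp [hc])
            · exact Or.inr ⟨z, hzt, hcz, rfl⟩

-- membership in one BFS step
theorem pv_mem_step (F : List (List Char × List String)) (y : List Char × List String) :
    y ∈ pvStep F ↔ ∃ st ∈ F, ∃ p ∈ PySem.List.enumerate st.2, pvCond st p = true ∧ y = pvChild st p := by
  unfold pvStep
  have : ∀ (acc : PySem.Set (List Char × List String)),
      (y ∈ F.foldl (fun nxt st =>
        (PySem.List.enumerate st.2).foldl
          (fun nxt2 p => if PySem.Chars.isIn p.2.toList st.1 then PySem.Set.add nxt2 (pvChild st p) else nxt2)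
          nxt) acc) ↔
      y ∈ acc ∨ ∃ st ∈ F, ∃ p ∈ PySem.List.enumerate st.2, pvCond st p = true ∧ y = pvChild st p := by
    induction F with
    | nil => simp
    | cons st t ih =>
        intro acc
        simp only [List.foldl_cons]
        rw [ih, pv_mem_foldl_add (fun p => PySem.Chars.isIn p.2.toList st.1) (pvChild st)]
        unfold pvCond
        constructor
        · rintro ((hy | ⟨p, hp, hcp, rfl⟩) | ⟨z, hz, hrest⟩)
          · exact Or.inl hy
          · exact Or.inr ⟨st, List.mem_cons_self, p, hp, hcp, rfl⟩
          · exact Or.inr ⟨z, List.mem_cons_of_mem _ hz, hrest⟩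
        · rintro (hy | ⟨z, hz, hrest⟩)
          · exact Or.inl (Or.inl hy)
          · rcases List.mem_cons.mp hz with rfl | hzt
            · exact Or.inl (Or.inr hrest)
            · exact Or.inr ⟨z, hzt, hrest⟩
  have h := this PySem.Set.empty
  simpa [PySem.Set.empty] using h

-- a child's remaining list is one shorter than its parent's
theorem pv_child_snd_len {st : List Char × List String} {p : Int × String}
    (hp : p ∈ PySem.List.enumerate st.2) :
    (pvChild st p).2.length = st.2.length - 1 ∧ 1 ≤ st.2.length := by
  rcases (PySem.List.mem_enumerate_iff _ _ _).mp hp with ⟨k, hk, rfl⟩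
  constructor
  · simpa [pvChild] using pv_child_len st.2 k hk
  · omega

-- the BFS loop computes depth + the max A-value of the frontier
theorem pv_loop_eq : ∀ (fuel : Nat) (F : List (List Char × List String)) (depth : Int),
    F ≠ [] → (∀ st ∈ F, st.2.length < fuel) → pvLoop fuel F depth = depth + pvFM F := by
  intro fuel
  induction fuel with
  | zero =>
      intro F depth hne hlt
      rcases List.exists_mem_of_ne_nil F hne with ⟨st, hst⟩
      exact absurd (hlt st hst) (by omega)
  | succ f ih =>
      intro F depth hne hlt
      show (if (pvStep F).isEmpty then depth else pvLoop f (pvStep F) (depth + 1)) = depth + pvFM F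
      by_cases hempty : (pvStep F).isEmpty
      · -- no state has a removable substring: every pvF is 0
        rw [if_pos hempty]
        have hnil : pvStep F = [] := List.isEmpty_iff.mp hempty
        have hzero : ∀ st ∈ F, pvF st = 0 := by
          intro st hst
          have hnoc : ∀ p ∈ PySem.List.enumerate st.2, pvCond st p = false := by
            intro p hp
            by_contra hcp
            have hcp' : pvCond st p = true := by
              cases h : pvCond st p
              · exact absurd h hcp
              · rfl
            have : pvChild st p ∈ pvStep F :=
              (pv_mem_step F _).mpr ⟨st, hst, p, hp, hcp', rfl⟩
            rw [hnil] at this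
            cases this
          have h1 : pvF st = pvF (st.1, st.2) := rfl
          rw [h1, pvF_unfold]
          exact pv_foldl_if_false _ _ _ 0 hnoc
        have : pvFM F = 0 :=
          le_antisymm (pvFM_le le_rfl (fun st hst => le_of_eq (hzero st hst))) (pvFM_nonneg F)
        rw [this]; ring
      · rw [if_neg hempty]
        have hnxt_ne : pvStep F ≠ [] := fun h => hempty (List.isEmpty_iff.mpr h)
        have hinv : ∀ st' ∈ pvStep F, st'.2.length < f := by
          intro st' hst'
          rcases (pv_mem_step F st').mp hst' with ⟨st, hst, p, hp, hcp, rfl⟩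
          have h1 := pv_child_snd_len hp
          have h2 := hlt st hst
          omega
        rw [ih (pvStep F) (depth + 1) hnxt_ne hinv]
        -- show pvFM F = 1 + pvFM (pvStep F)
        have key : pvFM F = 1 + pvFM (pvStep F) := by
          have hub : pvFM F ≤ 1 + pvFM (pvStep F) := by
            apply pvFM_le (by have := pvFM_nonneg (pvStep F); omega)
            intro st hst
            have h1 : pvF st = pvF (st.1, st.2) := rfl
            rw [h1, pvF_unfold]
            apply pv_foldl_if_le
            · have := pvFM_nonneg (pvStep F); omega
            · intro p hp hcp
              have hmem : pvChild (st.1, st.2) p ∈ pvStep F :=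
                (pv_mem_step F _).mpr ⟨st, hst, p, hp, hcp, rfl⟩
              have := le_pvFM hmem
              omega
          have hlb : 1 + pvFM (pvStep F) ≤ pvFM F := by
            rcases List.exists_mem_of_ne_nil _ hnxt_ne with ⟨y0, hy0⟩
            rcases (pv_mem_step F y0).mp hy0 with ⟨st0, hst0, p0, hp0, hcp0, rfl⟩
            have hge : ∀ st' ∈ pvStep F, pvF st' ≤ pvFM F - 1 := by
              intro st' hst'
              rcases (pv_mem_step F st').mp hst' with ⟨st, hst, p, hp, hcp, rfl⟩
              have h1 : pvF st = pvF (st.1, st.2) := rfl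
              have h2 : 1 + pvF (pvChild (st.1, st.2) p) ≤ pvF (st.1, st.2) := by
                conv_rhs => rw [pvF_unfold]
                exact pv_mem_le_foldl_if (pvCond (st.1, st.2))
                  (fun q => 1 + pvF (pvChild (st.1, st.2) q)) _ 0 hp hcp
              have h3 := le_pvFM hst
              rw [h1] at h3
              have heq : pvChild (st.1, st.2) p = pvChild st p := rfl
              rw [heq] at h2
              omega
            have hone : 1 ≤ pvFM F := by
              have h2 : 1 + pvF (pvChild (st0.1, st0.2) p0) ≤ pvF (st0.1, st0.2) := by
                conv_rhs => rw [pvF_unfold]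
                exact pv_mem_le_foldl_if (pvCond (st0.1, st0.2))
                  (fun q => 1 + pvF (pvChild (st0.1, st0.2) q)) _ 0 hp0 hcp0
              have h3 := pvF_nonneg (pvChild (st0.1, st0.2) p0)
              have h4 := le_pvFM hst0
              have h5 : pvF st0 = pvF (st0.1, st0.2) := rfl
              omega
            have := pvFM_le (by omega) hge
            omega
          omega
        rw [key]; ring

-- ===== VERDICT (by name: the statement is the Claim_ definition above) =====
theorem maxSubstringRemoval_spec : Claim_equal_maxSubstringRemoval := by
  intro substrings main_string _
  show maxSubstringRemoval substrings main_string = maxSubstringRemoval_alt substrings main_string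
  have hset : PySem.Set.ofList [(main_string.toList, substrings)] = [(main_string.toList, substrings)] := rfl
  unfold maxSubstringRemoval_alt
  rw [hset]
  rw [pv_loop_eq (substrings.length + 1) [(main_string.toList, substrings)] 0
    (by simp) (by intro st hst; rcases List.mem_singleton.mp hst with rfl; simp)]
  have h1 : pvFM [(main_string.toList, substrings)] = max 0 (pvF (main_string.toList, substrings)) := rfl
  have h2 : maxSubstringRemoval substrings main_string = pvF (main_string.toList, substrings) := rfl
  rw [h1, h2]
  have := pvF_nonneg (main_string.toList, substrings)
  omega
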